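-- pv_equiv track=rewrite | github.com/NagadathGummadi-Personal/AHF | utils/converters/partial_json_parser.py | _complete_string
-- ===== SOURCE A (Python) =====
-- from typing import Any, Dict, List, Optional, Tuple
--
-- def _complete_string(s: str, pos: int) -> Tuple[Optional[str], int]:
--     """
--     Complete a JSON string starting at position pos.
--
--     Handles:
--     - Complete strings: "hello" -> "hello"
--     - Incomplete strings: "hel -> "hel"
--     - Escape sequences: "hello\nworld -> "hello\nworld"
--     """
--     if pos >= len(s) or s[pos] != '"':
--         return None, pos
--
--     pos += 1  # Skip opening quote
--     string_chars = ['"']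
--     escape_next = False
--
--     while pos < len(s):
--         char = s[pos]
--
--         if escape_next:
--             string_chars.append(char)
--             escape_next = False
--             pos += 1
--             continue
--
--         if char == '\\':
--             string_chars.append(char)
--             escape_next = True
--             pos += 1
--             continue
--
--         if char == '"':
--             string_chars.append('"')
--             return ''.join(string_chars), pos + 1
--
--         string_chars.append(char)
--         pos += 1
--
--     # String wasn't closed - close it
--     string_chars.append('"')
--     return ''.join(string_chars), pos
-- ===== SOURCE B (Python) =====
-- from typing import Optional, Tuple
--
-- def _complete_string(s: str, pos: int) -> Tuple[Optional[str], int]: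
--     if pos >= len(s) or s[pos] != '"':
--         return None, pos
--     start = pos
--     pos += 1
--     while pos < len(s):
--         c = s[pos]
--         if c == '\\':
--             pos += 2          # skip the escaped pair; no escape flag needed
--         elif c == '"':
--             return s[start:pos + 1], pos + 1
--         else:
--             pos += 1
--     return s[start:] + '"', len(s)
-- ===== Notes on version B (the rewrite author's own statement) =====
-- stated objective: simpler
-- what changed: Replaces A's char-by-char accumulation with an escape_next state flag by a stateless index scan that skips escaped pairs with pos += 2 and returns a single slice of the input (s[start:pos+1] / s[start:] + '"').
-- outside the precondition, e.g. on _complete_string('"ab', -3): A returns ('"ab"', 1), B returns ('"', 1)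
import Mathlib
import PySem

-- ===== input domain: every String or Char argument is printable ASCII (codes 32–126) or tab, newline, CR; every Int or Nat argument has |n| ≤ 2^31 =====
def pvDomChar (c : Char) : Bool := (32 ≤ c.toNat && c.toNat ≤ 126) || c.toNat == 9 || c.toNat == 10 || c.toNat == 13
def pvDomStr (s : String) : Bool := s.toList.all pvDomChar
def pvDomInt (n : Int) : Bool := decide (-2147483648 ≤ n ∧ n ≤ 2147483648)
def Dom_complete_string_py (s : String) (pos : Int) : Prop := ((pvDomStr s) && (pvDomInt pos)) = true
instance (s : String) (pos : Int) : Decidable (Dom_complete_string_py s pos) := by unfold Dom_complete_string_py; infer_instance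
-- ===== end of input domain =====

-- B replaces A's escape flag + char-by-char accumulation with an index scan (backslash skips 2) and a single slice; objective: simpler.

-- ===== PORT A =====
-- the while loop: state = (accumulated chars, pos, escape_next); iterates over the remaining chars (pos always advances by 1)
def pvAloop : List Char → List Char → Int → Bool → Option String × Int
  | [], acc, pos, _ => (some (String.ofList (acc ++ ['"'])), pos)      -- loop ends: close the string
  | c :: rest, acc, pos, escape =>
    if escape then pvAloop rest (acc ++ [c]) (pos + 1) false
    else if c = '\\' then pvAloop rest (acc ++ [c]) (pos + 1) true
    else if c = '"' then (some (String.ofList (acc ++ ['"'])), pos + 1)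
    else pvAloop rest (acc ++ [c]) (pos + 1) escape

def complete_string_py (s : String) (pos : Int) : Option String × Int :=
  let cs := s.toList
  if pos ≥ (cs.length : Int) then (none, pos)
  else
    match PySem.List.pyGet? cs pos with
    | none => (none, pos)        -- Python raises IndexError here (pos < -len(s)); outside Pre_
    | some c =>
      if c ≠ '"' then (none, pos)
      -- for negative pos Python's loop would wrap; such inputs are outside Pre_ (0 ≤ pos), where .toNat is exact
      else pvAloop (cs.drop (pos + 1).toNat) ['"'] (pos + 1) false

-- ===== PORT B =====
-- the while loop of Source B: pure index scan; '\\' jumps 2, '"' returns s[start:pos+1], else 1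
def pvBloop (cs : List Char) (start : Nat) (pos : Nat) : Option String × Int :=
  if h : pos < cs.length then
    if cs[pos] = '\\' then pvBloop cs start (pos + 2)
    else if cs[pos] = '"' then
      (some (String.ofList (PySem.List.slice cs (some (start : Int)) (some ((pos : Int) + 1)))), (pos : Int) + 1)
    else pvBloop cs start (pos + 1)
  else (some (String.ofList (cs.drop start ++ ['"'])), (cs.length : Int))   -- s[start:] + '"', len(s)
termination_by cs.length - pos

def complete_string_py_alt (s : String) (pos : Int) : Option String × Int :=
  let cs := s.toList
  if pos ≥ (cs.length : Int) then (none, pos)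
  else
    match PySem.List.pyGet? cs pos with
    | none => (none, pos)
    | some c =>
      if c ≠ '"' then (none, pos)
      else pvBloop cs pos.toNat (pos.toNat + 1)

-- ===== PRECONDITION & SPEC =====
-- Pre_ excludes negative pos at which A raises IndexError (pos < -len(s)) or at which s[pos] is a
-- quote, where A's scan starts at a wrapped position and its value is an accident of Python's
-- negative-index wraparound; negative in-range pos with s[pos] != '"' (both return (None, pos)) stay inside.
def Pre_complete_string_py (s : String) (pos : Int) : Prop :=
  0 ≤ pos ∨ (-(s.toList.length : Int) ≤ pos ∧ PySem.List.pyGet? s.toList pos ≠ some '"')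
instance (s : String) (pos : Int) : Decidable (Pre_complete_string_py s pos) := by unfold Pre_complete_string_py; infer_instance
def pvWitness_complete_string_py : String × Int := ("\"ab", 0)

def Spec_complete_string_py (s : String) (pos : Int) (out : Option String × Int) : Prop := out = complete_string_py_alt s pos
instance (s : String) (pos : Int) (out : Option String × Int) : Decidable (Spec_complete_string_py s pos out) := by unfold Spec_complete_string_py; infer_instance

-- ===== CLAIM (what is proved, stated in full; the proofs are below) =====
def Claim_equal_complete_string_py : Prop := ∀ (s : String) (pos : Int), Dom_complete_string_py s pos → Pre_complete_string_py s pos → Spec_complete_string_py s pos (complete_string_py s pos)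

-- ===== LEMMAS AND PROOFS =====


-- dropping from the opening quote: cs[start] is '"'
lemma pv_drop_start (cs : List Char) (start : Nat) (hq : cs[start]? = some '"') :
    cs.drop start = '"' :: cs.drop (start + 1) := by
  have h : start < cs.length := (List.getElem?_eq_some_iff.mp hq).1
  rw [List.drop_eq_getElem_cons h]
  have := (List.getElem?_eq_some_iff.mp hq).2
  simp [this]

-- extending the accumulated prefix by the char at index i = start+1+k
lemma pv_take_snoc (cs : List Char) (start k i : Nat) (hi : i < cs.length)
    (heq : start + 1 + k = i) :
    (cs.drop (start + 1)).take (k + 1) = (cs.drop (start + 1)).take k ++ [cs[i]] := by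
  subst heq
  rw [List.take_add_one, List.getElem?_drop, List.getElem?_eq_getElem hi]
  rfl

-- loop invariant: at scan position j (start < j ≤ len), A's accumulator is the opening quote
-- followed by the chars strictly between start and j, and the two loops agree from there on
lemma pv_loop_eq : ∀ (n : Nat) (cs : List Char) (start j : Nat),
    cs.length - j ≤ n → start < j → j ≤ cs.length → cs[start]? = some '"' →
    pvAloop (cs.drop j) ('"' :: (cs.drop (start + 1)).take (j - 1 - start)) (j : Int) false
      = pvBloop cs start j := by
  intro n
  induction n with
  | zero =>
    intro cs start j hn hsj hjl hq
    obtain rfl : j = cs.length := by omega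
    rw [pvBloop]
    have htake : (cs.drop (start + 1)).take (cs.length - 1 - start) = cs.drop (start + 1) :=
      List.take_of_length_le (by simp; omega)
    simp [pvAloop, htake, pv_drop_start cs start hq]
  | succ n ih =>
    intro cs start j hn hsj hjl hq
    by_cases hj : j < cs.length
    · have hdropj : cs.drop j = cs[j] :: cs.drop (j + 1) := List.drop_eq_getElem_cons hj
      rw [pvBloop, dif_pos hj, hdropj]
      by_cases hc1 : cs[j] = '\\'
      · by_cases hj1 : j + 1 < cs.length
        · -- escaped pair fully inside the string: both sides advance by 2
          have hdropj1 : cs.drop (j + 1) = cs[j + 1] :: cs.drop (j + 2) :=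
            List.drop_eq_getElem_cons hj1
          have hacc : (cs.drop (start + 1)).take (j + 2 - 1 - start)
              = (cs.drop (start + 1)).take (j - 1 - start) ++ ['\\'] ++ [cs[j + 1]] := by
            rw [show j + 2 - 1 - start = (j - start) + 1 by omega,
                pv_take_snoc cs start (j - start) (j + 1) hj1 (by omega),
                show j - start = (j - 1 - start) + 1 by omega,
                pv_take_snoc cs start (j - 1 - start) j hj (by omega), hc1]
          have hih := ih cs start (j + 2) (by omega) (by omega) (by omega) hq
          rw [hacc] at hih
          push_cast at hih
          simp only [pvAloop, hc1, Bool.false_eq_true, reduceIte, hdropj1]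
          simp only [List.cons_append, List.append_assoc] at hih ⊢
          rw [show (j : Int) + 1 + 1 = (j : Int) + 2 by ring]
          exact hih
        · -- trailing backslash is the last char: both sides terminate
          have hdrop1 : cs.drop (j + 1) = [] := List.drop_of_length_le (by omega)
          rw [pvBloop, dif_neg (by omega)]
          have hfull : (cs.drop (start + 1)).take ((j - 1 - start) + 1) = cs.drop (start + 1) :=
            List.take_of_length_le (by simp; omega)
          have h1 : (cs.drop (start + 1)).take ((j - 1 - start) + 1)
              = (cs.drop (start + 1)).take (j - 1 - start) ++ ['\\'] := by
            rw [pv_take_snoc cs start (j - 1 - start) j hj (by omega), hc1]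
          simp only [pvAloop, hc1, Bool.false_eq_true, reduceIte, hdrop1,
            Prod.mk.injEq]
          have hds : cs.drop (start + 1)
              = (cs.drop (start + 1)).take (j - 1 - start) ++ ['\\'] := by rw [← h1, hfull]
          refine ⟨?_, by omega⟩
          congr 1
          rw [pv_drop_start cs start hq]
          conv_rhs => rw [hds]
          simp
      · by_cases hc2 : cs[j] = '"'
        · -- closing quote: both return the slice s[start:j+1] and position j+1
          have h1 : (cs.drop (start + 1)).take ((j - 1 - start) + 1)
              = (cs.drop (start + 1)).take (j - 1 - start) ++ ['"'] := by
            rw [pv_take_snoc cs start (j - 1 - start) j hj (by omega), hc2]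
          simp only [pvAloop, hc2, Bool.false_eq_true, reduceIte]
          rw [if_neg (by decide), if_neg (by decide)]
          refine congrArg₂ Prod.mk (congrArg _ (congrArg _ ?_)) rfl
          rw [show ((j : Int) + 1) = ((j + 1 : Nat) : Int) by push_cast; ring,
              PySem.List.slice_natCast, pv_drop_start cs start hq,
              show j + 1 - start = ((j - 1 - start) + 1) + 1 by omega]
          simp only [List.take_succ_cons, h1]
          simp
        · -- ordinary char: both advance by 1
          have h1 : (cs.drop (start + 1)).take (j + 1 - 1 - start)
              = (cs.drop (start + 1)).take (j - 1 - start) ++ [cs[j]] := by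
            rw [show j + 1 - 1 - start = (j - 1 - start) + 1 by omega,
                pv_take_snoc cs start (j - 1 - start) j hj (by omega)]
          have hih := ih cs start (j + 1) (by omega) (by omega) (by omega) hq
          rw [h1] at hih
          push_cast at hih
          simp only [pvAloop, Bool.false_eq_true, reduceIte, if_neg hc1, if_neg hc2]
          simp only [List.cons_append] at hih ⊢
          exact hih
    · obtain rfl : j = cs.length := by omega
      rw [pvBloop]
      have htake : (cs.drop (start + 1)).take (cs.length - 1 - start) = cs.drop (start + 1) :=
        List.take_of_length_le (by simp; omega)
      simp [pvAloop, htake, pv_drop_start cs start hq]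

-- ===== VERDICT (by name: the statement is the Claim_ definition above) =====
theorem complete_string_py_spec : Claim_equal_complete_string_py := by
  intro s pos _dom hpre
  unfold Spec_complete_string_py complete_string_py complete_string_py_alt
  rcases hpre with hpre | ⟨_, h2⟩
  case inr =>
    -- s[pos] is not a quote (or out of range): both sides fall through the guard to (none, pos)
    by_cases hlen : (pos : Int) ≥ (s.toList.length : Int)
    · simp only [hlen, if_true]
    · simp only [hlen, if_false]
      cases hg : PySem.List.pyGet? s.toList pos with
      | none => rfl
      | some c =>
        have hc : c ≠ '"' := fun h => h2 (by rw [hg, h])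
        simp only [ne_eq, hc, not_false_eq_true, if_true]
  obtain ⟨p, rfl⟩ := Int.eq_ofNat_of_zero_le hpre
  by_cases hlen : (p : Int) ≥ (s.toList.length : Int)
  · simp only [hlen, if_true]
  · have hp : p < s.toList.length := by exact_mod_cast by omega
    simp only [hlen, if_false]
    rw [PySem.List.pyGet?_natCast, List.getElem?_eq_getElem hp]
    by_cases hq : s.toList[p] = '"'
    · simp only [hq, ne_eq, not_true_eq_false, if_false,
        show ((p : Int) + 1).toNat = p + 1 by omega, Int.toNat_natCast]
      have := pv_loop_eq (s.toList.length - (p + 1)) s.toList p (p + 1) (le_refl _)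
        (by omega) (by omega) (by rw [List.getElem?_eq_getElem hp, hq])
      rw [show ((p + 1 : Nat) : Int) = (p : Int) + 1 by push_cast; ring,
          show (p + 1) - 1 - p = 0 by omega] at this
      simpa using this
    · simp [hq]
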